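-- pv_equiv track=rewrite | github.com/AlexP55/CyraBot | cogs/leaderboard.py | size_limit_join
-- ===== SOURCE A (Python) =====
-- def size_limit_join(lines, size_limit, separator="\n"):
--   if len(lines[0]) > size_limit:
--     return ""
--   output = lines.pop(0)
--   while lines:
--     new_line = lines.pop(0)
--     if len(output) + len(new_line) + len(separator) > size_limit:
--       lines.insert(0, new_line)
--       break
--     else:
--       output = f"{output}{separator}{new_line}"
--   return output
-- ===== SOURCE B (Python) =====
-- def size_limit_join(lines, size_limit, separator="\n"):
--     # Stage 1: build the list of prefix sizes (size of joining the first i+1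
--     # lines).  Stage 2: binary-search that nondecreasing list for the largest
--     # fitting prefix length k.  Stage 3: one join, one slice-delete.
--     sep_len = len(separator)
--     prefix = []
--     total = 0
--     for line in lines:
--         total += len(line) if not prefix else sep_len + len(line)
--         prefix.append(total)
--     if prefix[0] > size_limit:
--         return ""
--     lo, hi = 1, len(prefix)
--     while lo < hi:
--         mid = (lo + hi + 1) // 2
--         if prefix[mid - 1] <= size_limit:
--             lo = mid
--         else:
--             hi = mid - 1
--     out = separator.join(lines[:lo])
--     del lines[:lo]
--     return out
-- ===== Notes on version B (the rewrite author's own statement) =====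
-- stated objective: alternative
-- what changed: B is staged: it first builds the list of prefix join-sizes, then binary-searches that nondecreasing list for the largest fitting cutoff k, then does a single separator.join of the k-prefix, instead of A's destructive loop that pops lines from the front and rebuilds the output string by concatenation at every step.
import Mathlib
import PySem

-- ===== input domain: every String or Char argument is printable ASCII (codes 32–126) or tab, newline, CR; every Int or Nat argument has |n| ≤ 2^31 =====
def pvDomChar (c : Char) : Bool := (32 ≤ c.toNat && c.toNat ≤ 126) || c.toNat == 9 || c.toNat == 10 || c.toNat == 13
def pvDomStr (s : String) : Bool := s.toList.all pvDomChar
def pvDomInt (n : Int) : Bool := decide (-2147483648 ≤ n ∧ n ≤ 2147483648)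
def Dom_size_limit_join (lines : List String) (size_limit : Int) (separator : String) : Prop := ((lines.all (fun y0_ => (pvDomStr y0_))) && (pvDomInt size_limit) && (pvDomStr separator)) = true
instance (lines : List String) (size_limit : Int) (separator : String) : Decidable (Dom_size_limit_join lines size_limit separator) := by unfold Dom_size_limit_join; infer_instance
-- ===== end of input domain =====

-- B replaces A's pop/concatenate loop by pfx sums + binary search + one join;
-- both Pythons mutate `lines` identically (consumed pfx removed); the theorems
-- here are about the return value only.

-- ===== PORT A =====
-- A's while loop: pop the next line, stop if it would overflow, else append it
-- to the accumulated output string.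
def sizeLimitJoinLoopA (output : String) (rest : List String) (size_limit : Int) (separator : String) : String :=
  match rest with
  | [] => output
  | new_line :: rest' =>
    if PySem.Str.len output + PySem.Str.len new_line + PySem.Str.len separator > size_limit then
      output
    else
      sizeLimitJoinLoopA (output ++ separator ++ new_line) rest' size_limit separator

def size_limit_join (lines : List String) (size_limit : Int) (separator : String) : String :=
  match lines with
  | [] => ""  -- unreachable under Pre_ (Python raises IndexError on lines[0])
  | first :: rest =>
    if PySem.Str.len first > size_limit then ""
    else sizeLimitJoinLoopA first rest size_limit separator

-- ===== PORT B =====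
-- B stage 1: the for-loop building `pfx` (pfx[i] = size of joining lines[0..i]).
def sljPrefixAux (sep_len : Int) (total : Int) (ls : List String) : List Int :=
  match ls with
  | [] => []
  | l :: t =>
    let total' := total + sep_len + PySem.Str.len l
    total' :: sljPrefixAux sep_len total' t

def sljPrefix (sep_len : Int) (ls : List String) : List Int :=
  match ls with
  | [] => []
  | l :: t => PySem.Str.len l :: sljPrefixAux sep_len (PySem.Str.len l) t

-- B stage 2: the while-loop binary search for the largest k with pfx[k-1] ≤ size_limit.
def sljBSearch (pfx : List Int) (size_limit : Int) (lo hi : Nat) : Nat :=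
  if _h : lo < hi then
    let mid := (lo + hi + 1) / 2
    if pfx.getD (mid - 1) 0 ≤ size_limit then sljBSearch pfx size_limit mid hi
    else sljBSearch pfx size_limit lo (mid - 1)
  else lo
termination_by hi - lo
decreasing_by all_goals omega

def size_limit_join_alt (lines : List String) (size_limit : Int) (separator : String) : String :=
  let pfx := sljPrefix (PySem.Str.len separator) lines
  match pfx with
  | [] => ""  -- unreachable under Pre_ (Python raises IndexError on pfx[0])
  | p0 :: _ =>
    if p0 > size_limit then ""
    else
      let k := sljBSearch pfx size_limit 1 pfx.length
      PySem.Str.join separator (lines.take k)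

-- ===== PRECONDITION & SPEC =====
-- Pre_ excludes only the empty list, where the Python A raises IndexError on lines[0].
def Pre_size_limit_join (lines : List String) (size_limit : Int) (separator : String) : Prop := lines ≠ []
instance (lines : List String) (size_limit : Int) (separator : String) : Decidable (Pre_size_limit_join lines size_limit separator) := by unfold Pre_size_limit_join; infer_instance
def pvWitness_size_limit_join : List String × Int × String := (["ab", "cde"], 7, "\n")

def Spec_size_limit_join (lines : List String) (size_limit : Int) (separator : String) (out : String) : Prop := out = size_limit_join_alt lines size_limit separator
instance (lines : List String) (size_limit : Int) (separator : String) (out : String) : Decidable (Spec_size_limit_join lines size_limit separator out) := by unfold Spec_size_limit_join; infer_instance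

-- ===== CLAIM (what is proved, stated in full; the proofs are below) =====
def Claim_equal_size_limit_join : Prop := ∀ (lines : List String) (size_limit : Int) (separator : String), Dom_size_limit_join lines size_limit separator → Pre_size_limit_join lines size_limit separator → Spec_size_limit_join lines size_limit separator (size_limit_join lines size_limit separator)

-- ===== LEMMAS AND PROOFS =====

-- Ghost counter (proof device only): how many further lines A's loop absorbs.
def sljCount (total : Int) (rest : List String) (size_limit : Int) (sep_len : Int) : Nat :=
  match rest with
  | [] => 0
  | line :: rest' =>
    let total' := total + sep_len + PySem.Str.len line
    if total' > size_limit then 0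
    else 1 + sljCount total' rest' size_limit sep_len

theorem join_singleton_str (sep a : String) : PySem.Str.join sep [a] = a := by
  apply String.toList_inj.mp
  simp only [PySem.Str.toList_join, List.map_cons, List.map_nil, PySem.Chars.join_singleton]

-- join absorbs a manual "append one more piece" step.
theorem join_append_cons (sep a b : String) (xs : List String) :
    PySem.Str.join sep ((a ++ sep ++ b) :: xs) = PySem.Str.join sep (a :: b :: xs) := by
  apply String.toList_inj.mp
  simp only [PySem.Str.toList_join, List.map_cons, String.toList_append,
    PySem.Chars.join_cons_cons]
  cases xs with
  | nil => simp [PySem.Chars.join_singleton]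
  | cons c cs => simp [PySem.Chars.join_cons_cons]

-- A's concatenation loop equals the join of the pfx the ghost counter selects.
theorem loopA_eq_join (rest : List String) (output : String) (size_limit : Int) (separator : String) :
    sizeLimitJoinLoopA output rest size_limit separator =
      PySem.Str.join separator
        (output :: rest.take (sljCount (PySem.Str.len output) rest size_limit (PySem.Str.len separator))) := by
  induction rest generalizing output with
  | nil => simp [sizeLimitJoinLoopA, sljCount, join_singleton_str]
  | cons l t ih =>
    simp only [sizeLimitJoinLoopA, sljCount]
    by_cases h : PySem.Str.len output + PySem.Str.len separator + PySem.Str.len l > size_limit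
    · rw [if_pos (by omega), if_pos (by omega), List.take_zero, join_singleton_str]
    · rw [if_neg (by omega), if_neg (by omega), ih (output ++ separator ++ l)]
      have hlen : PySem.Str.len (output ++ separator ++ l)
          = PySem.Str.len output + PySem.Str.len separator + PySem.Str.len l := by
        rw [PySem.Str.len_append, PySem.Str.len_append]
      rw [hlen, Nat.add_comm 1, List.take_succ_cons, join_append_cons]

theorem str_len_nonneg (s : String) : 0 ≤ PySem.Str.len s := by
  simp [PySem.Str.len]

theorem sljPrefixAux_length (sep total : Int) (ls : List String) :
    (sljPrefixAux sep total ls).length = ls.length := by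
  induction ls generalizing total with
  | nil => rfl
  | cons l t ih => simp [sljPrefixAux, ih]

theorem sljCount_le_length (total : Int) (rest : List String) (size_limit sep : Int) :
    sljCount total rest size_limit sep ≤ rest.length := by
  induction rest generalizing total with
  | nil => simp [sljCount]
  | cons l t ih =>
    simp only [sljCount]
    split
    · simp
    · simpa [Nat.add_comm 1] using Nat.succ_le_succ (ih _)

-- every entry of the pfx-sum tail is ≥ the starting total (increments are nonnegative)
theorem sljPrefixAux_ge (sep : Int) (hsep : 0 ≤ sep) (total : Int) (ls : List String) :
    ∀ i < ls.length, total ≤ (sljPrefixAux sep total ls).getD i 0 := by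
  induction ls generalizing total with
  | nil => intro i hi; simp at hi
  | cons l t ih =>
    intro i hi
    have hl := str_len_nonneg l
    cases i with
    | zero => simp [sljPrefixAux]; omega
    | succ j =>
      simp only [sljPrefixAux, List.getD_cons_succ]
      have := ih (total + sep + PySem.Str.len l) j (by simpa using Nat.lt_of_succ_lt_succ hi)
      omega

-- the ghost counter marks exactly the boundary in the pfx-sum tail
theorem sljCount_prefixAux (sep : Int) (hsep : 0 ≤ sep) (size_limit : Int) :
    ∀ (rest : List String) (total : Int),
      (∀ i < sljCount total rest size_limit sep,
        (sljPrefixAux sep total rest).getD i 0 ≤ size_limit) ∧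
      (∀ i, sljCount total rest size_limit sep ≤ i → i < rest.length →
        size_limit < (sljPrefixAux sep total rest).getD i 0) := by
  intro rest
  induction rest with
  | nil => intro total; constructor <;> intro i h1 <;> simp [sljCount] at h1 ⊢
  | cons l t ih =>
    intro total
    simp only [sljCount, sljPrefixAux]
    by_cases h : total + sep + PySem.Str.len l > size_limit
    · rw [if_pos h]
      refine ⟨by intro i hi; simp at hi, ?_⟩
      intro i _ hi
      cases i with
      | zero => simpa using h
      | succ j =>
        simp only [List.getD_cons_succ]
        have := sljPrefixAux_ge sep hsep (total + sep + PySem.Str.len l) t j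
          (by simpa using Nat.lt_of_succ_lt_succ hi)
        omega
    · rw [if_neg h]
      obtain ⟨ih1, ih2⟩ := ih (total + sep + PySem.Str.len l)
      constructor
      · intro i hi
        cases i with
        | zero => simpa using (by omega : total + sep + PySem.Str.len l ≤ size_limit)
        | succ j =>
          simp only [List.getD_cons_succ]
          exact ih1 j (by omega)
      · intro i hge hlt
        cases i with
        | zero => omega
        | succ j =>
          simp only [List.getD_cons_succ]
          exact ih2 j (by omega) (by simpa using Nat.lt_of_succ_lt_succ hlt)

-- binary-search correctness: if k is the boundary inside [lo, hi], the search returns k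
theorem sljBSearch_eq (p : List Int) (size_limit : Int) (k : Nat) :
    ∀ lo hi, lo ≤ k → k ≤ hi →
      (∀ j, lo ≤ j → j ≤ k → p.getD (j - 1) 0 ≤ size_limit) →
      (∀ j, k < j → j ≤ hi → size_limit < p.getD (j - 1) 0) →
      sljBSearch p size_limit lo hi = k := by
  intro lo hi
  induction hgas : hi - lo using Nat.strong_induction_on generalizing lo hi with
  | _ n ih =>
    intro hlo hhi hP hNP
    unfold sljBSearch
    by_cases h : lo < hi
    · rw [dif_pos h]
      set mid := (lo + hi + 1) / 2 with hmid
      have hmid1 : lo < mid := by omega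
      have hmid2 : mid ≤ hi := by omega
      by_cases hle : p.getD (mid - 1) 0 ≤ size_limit
      · rw [if_pos hle]
        have hmk : mid ≤ k := by
          by_contra hc
          exact absurd hle (not_le.mpr (hNP mid (by omega) hmid2))
        exact ih (hi - mid) (by omega) mid hi rfl hmk hhi
          (fun j h1 h2 => hP j (by omega) h2) hNP
      · rw [if_neg hle]
        have hmk : k ≤ mid - 1 := by
          by_contra hc
          exact hle (hP mid (by omega) (by omega))
        exact ih (mid - 1 - lo) (by omega) lo (mid - 1) rfl hlo hmk hP
          (fun j h1 h2 => hNP j h1 (by omega))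
    · rw [dif_neg h]; omega

-- ===== VERDICT (by name: the statement is the Claim_ definition above) =====
theorem size_limit_join_spec : Claim_equal_size_limit_join := by
  intro lines size_limit separator _hdom hpre
  cases lines with
  | nil => exact absurd rfl hpre
  | cons first rest =>
    unfold Spec_size_limit_join
    simp only [size_limit_join, size_limit_join_alt, sljPrefix]
    by_cases h0 : PySem.Str.len first > size_limit
    · rw [if_pos h0, if_pos h0]
    · rw [if_neg h0, if_neg h0]
      have hsep := str_len_nonneg separator
      set sep := PySem.Str.len separator with hsepdef
      set c := sljCount (PySem.Str.len first) rest size_limit sep with hc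
      have hcle := sljCount_le_length (PySem.Str.len first) rest size_limit sep
      obtain ⟨hc1, hc2⟩ := sljCount_prefixAux sep hsep size_limit rest (PySem.Str.len first)
      have hsearch : sljBSearch (PySem.Str.len first :: sljPrefixAux sep (PySem.Str.len first) rest)
          size_limit 1 (PySem.Str.len first :: sljPrefixAux sep (PySem.Str.len first) rest).length
          = c + 1 := by
        apply sljBSearch_eq _ _ (c + 1) 1 _ (by omega)
          (by simp [sljPrefixAux_length]; omega)
        · intro j h1 h2
          cases j with
          | zero => omega
          | succ i =>
            cases i with
            | zero => simpa using not_lt.mp h0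
            | succ m =>
              simp only [Nat.add_sub_cancel, List.getD_cons_succ]
              exact hc1 m (by omega)
        · intro j h1 h2
          cases j with
          | zero => omega
          | succ i =>
            cases i with
            | zero => omega
            | succ m =>
              simp only [Nat.add_sub_cancel, List.getD_cons_succ]
              simp [sljPrefixAux_length] at h2
              exact hc2 m (by omega) (by omega)
      rw [hsearch, loopA_eq_join, List.take_succ_cons]
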